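-- pv_equiv track=rewrite | github.com/Cappycot/nyx | cogs/unison.py | add_times
-- ===== SOURCE A (Python) =====
-- def add_times(time1, minutes):
--     day1 = time1 // 10000
--     hour1 = (time1 % 10000) // 100
--     min1 = time1 % 100 + minutes
--     hour1 += min1 // 60
--     min1 %= 60
--     day1 += hour1 // 24
--     hour1 %= 24
--     while day1 > 7:
--         day1 -= 7
--     return day1 * 10000 + hour1 * 100 + min1
-- ===== SOURCE B (Python) =====
-- def add_times(time1, minutes):
--     total = (time1 // 10000) * 1440 + ((time1 % 10000) // 100) * 60 + time1 % 100 + minutes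
--     day = total // 1440
--     if day > 7:
--         day = (day - 1) % 7 + 1
--     return day * 10000 + ((total // 60) % 24) * 100 + total % 60
-- ===== Notes on version B (the rewrite author's own statement) =====
-- stated objective: alternative
-- what changed: B converts the encoded timestamp to a single total-minutes value and decodes day/hour/minute directly with floored div/mod (closed-form day wrap) instead of propagating minute->hour->day carries field by field with a subtraction loop for the day wrap.
import Mathlib
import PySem

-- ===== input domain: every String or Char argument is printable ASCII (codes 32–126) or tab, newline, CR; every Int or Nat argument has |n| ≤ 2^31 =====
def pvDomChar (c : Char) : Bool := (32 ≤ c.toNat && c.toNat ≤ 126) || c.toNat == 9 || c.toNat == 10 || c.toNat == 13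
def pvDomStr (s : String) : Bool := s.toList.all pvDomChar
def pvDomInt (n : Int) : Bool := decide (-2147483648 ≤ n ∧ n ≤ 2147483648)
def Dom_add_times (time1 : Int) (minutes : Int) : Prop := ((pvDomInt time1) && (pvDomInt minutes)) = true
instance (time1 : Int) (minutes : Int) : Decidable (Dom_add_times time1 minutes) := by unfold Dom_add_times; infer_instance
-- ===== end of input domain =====

-- B replaces the digit-wise carry propagation by one total-minutes value decoded with
-- floored division/modulo (alternative decomposition; same cost).


-- ===== PORT A =====
-- the 'while day1 > 7: day1 -= 7' loop of A
def pvWrapA (d : Int) : Int :=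
  if 7 < d then pvWrapA (d - 7) else d
termination_by d.toNat
decreasing_by omega

def add_times (time1 : Int) (minutes : Int) : Int :=
  let day1 := PySem.Int.floordiv time1 10000
  let hour1 := PySem.Int.floordiv (PySem.Int.mod time1 10000) 100
  let min1 := PySem.Int.mod time1 100 + minutes
  let hour1 := hour1 + PySem.Int.floordiv min1 60
  let min1 := PySem.Int.mod min1 60
  let day1 := day1 + PySem.Int.floordiv hour1 24
  let hour1 := PySem.Int.mod hour1 24
  pvWrapA day1 * 10000 + hour1 * 100 + min1

-- ===== PORT B =====
def add_times_alt (time1 : Int) (minutes : Int) : Int :=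
  let total := PySem.Int.floordiv time1 10000 * 1440
    + PySem.Int.floordiv (PySem.Int.mod time1 10000) 100 * 60
    + PySem.Int.mod time1 100 + minutes
  let day := PySem.Int.floordiv total 1440
  let day := if 7 < day then PySem.Int.mod (day - 1) 7 + 1 else day
  day * 10000 + PySem.Int.mod (PySem.Int.floordiv total 60) 24 * 100 + PySem.Int.mod total 60

-- ===== PRECONDITION & SPEC =====
def Spec_add_times (time1 : Int) (minutes : Int) (out : Int) : Prop := out = add_times_alt time1 minutes
instance (time1 : Int) (minutes : Int) (out : Int) : Decidable (Spec_add_times time1 minutes out) := by unfold Spec_add_times; infer_instance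

-- ===== CLAIM (what is proved, stated in full; the proofs are below) =====
def Claim_equal_add_times : Prop := ∀ (time1 : Int) (minutes : Int), Dom_add_times time1 minutes → Spec_add_times time1 minutes (add_times time1 minutes)

-- ===== LEMMAS AND PROOFS =====

-- A's repeated 'day -= 7' equals B's closed-form wrap.
theorem pvWrapA_eq (d : Int) : pvWrapA d = if 7 < d then (d - 1) % 7 + 1 else d := by
  fun_induction pvWrapA d with
  | case1 d h ih =>
    rw [ih]
    by_cases h2 : 7 < d - 7
    · simp only [if_pos h, if_pos h2]
      omega
    · simp only [if_pos h, if_neg h2]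
      omega
  | case2 d h =>
    simp [h]

theorem add_times_spec' (time1 minutes : Int) :
    add_times time1 minutes = add_times_alt time1 minutes := by
  unfold add_times add_times_alt
  simp only [PySem.Int.floordiv_eq_ediv_of_pos (by norm_num : (0:Int) < 10000),
    PySem.Int.floordiv_eq_ediv_of_pos (by norm_num : (0:Int) < 100),
    PySem.Int.floordiv_eq_ediv_of_pos (by norm_num : (0:Int) < 60),
    PySem.Int.floordiv_eq_ediv_of_pos (by norm_num : (0:Int) < 24),
    PySem.Int.floordiv_eq_ediv_of_pos (by norm_num : (0:Int) < 1440),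
    PySem.Int.mod_eq_emod_of_pos (by norm_num : (0:Int) < 10000),
    PySem.Int.mod_eq_emod_of_pos (by norm_num : (0:Int) < 100),
    PySem.Int.mod_eq_emod_of_pos (by norm_num : (0:Int) < 60),
    PySem.Int.mod_eq_emod_of_pos (by norm_num : (0:Int) < 24),
    PySem.Int.mod_eq_emod_of_pos (by norm_num : (0:Int) < 7)]
  rw [pvWrapA_eq]
  have hday : time1 / 10000 + (time1 % 10000 / 100 + (time1 % 100 + minutes) / 60) / 24
      = (time1 / 10000 * 1440 + time1 % 10000 / 100 * 60 + time1 % 100 + minutes) / 1440 := by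
    omega
  have hhour : (time1 % 10000 / 100 + (time1 % 100 + minutes) / 60) % 24
      = (time1 / 10000 * 1440 + time1 % 10000 / 100 * 60 + time1 % 100 + minutes) / 60 % 24 := by
    omega
  have hmin : (time1 % 100 + minutes) % 60
      = (time1 / 10000 * 1440 + time1 % 10000 / 100 * 60 + time1 % 100 + minutes) % 60 := by
    omega
  rw [hday, hhour, hmin]

-- ===== VERDICT (by name: the statement is the Claim_ definition above) =====
theorem add_times_spec : Claim_equal_add_times := by
  intro time1 minutes _
  exact add_times_spec' time1 minutes
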